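-- pv_equiv track=rewrite | github.com/ozgurgulerx/presidio-pii-ozg | src/presidio_pii/view_formatter.py | _tidy_masked_preview
-- ===== SOURCE A (Python) =====
-- from typing import TYPE_CHECKING, Dict, Iterable, List, Sequence
--
-- def _tidy_masked_preview(masked_text: str) -> str:
--     if not masked_text:
--         return masked_text
--
--     lines = masked_text.splitlines(True)
--     result: List[str] = []
--     buffer: List[str] = []
--     buffer_newline = ""
--
--     for line in lines:
--         content = line.rstrip("\r\n")
--         newline = line[len(content) :]
--
--         if content and len(content) <= 1:
--             buffer.append(content)
--             buffer_newline = newline or buffer_newline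
--             continue
--
--         if buffer:
--             combined = "".join(buffer)
--             result.append(combined + (buffer_newline or "\n"))
--             buffer.clear()
--             buffer_newline = ""
--
--         result.append(line)
--
--     if buffer:
--         combined = "".join(buffer)
--         result.append(combined + (buffer_newline or "\n"))
--
--     return "".join(result)
-- ===== SOURCE B (Python) =====
-- def _tidy_masked_preview(masked_text: str) -> str:
--     if not masked_text:
--         return masked_text
--
--     pairs = []
--     for line in masked_text.splitlines(True):
--         content = line.rstrip("\r\n")
--         pairs.append((content, line[len(content):]))
--
--     def single(p):
--         return 0 < len(p[0]) <= 1
--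
--     out = []
--     i = 0
--     n = len(pairs)
--     while i < n:
--         p = pairs[i]
--         if single(p):
--             j = i + 1
--             while j < n and single(pairs[j]):
--                 j += 1
--             run = pairs[i:j]
--             nl = next((q[1] for q in reversed(run) if q[1]), "\n")
--             out.append("".join(q[0] for q in run) + nl)
--             i = j
--         else:
--             out.append(p[0] + p[1])
--             i += 1
--     return "".join(out)
-- ===== Notes on version B (the rewrite author's own statement) =====
-- stated objective: alternative
-- what changed: Replaces A's stateful buffer/buffer_newline accumulator loop with a precomputed (content, newline) pair list and a run-scanning two-index loop that consumes each maximal run of single-char lines at once, taking the last non-empty newline of the run directly.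
import Mathlib
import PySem

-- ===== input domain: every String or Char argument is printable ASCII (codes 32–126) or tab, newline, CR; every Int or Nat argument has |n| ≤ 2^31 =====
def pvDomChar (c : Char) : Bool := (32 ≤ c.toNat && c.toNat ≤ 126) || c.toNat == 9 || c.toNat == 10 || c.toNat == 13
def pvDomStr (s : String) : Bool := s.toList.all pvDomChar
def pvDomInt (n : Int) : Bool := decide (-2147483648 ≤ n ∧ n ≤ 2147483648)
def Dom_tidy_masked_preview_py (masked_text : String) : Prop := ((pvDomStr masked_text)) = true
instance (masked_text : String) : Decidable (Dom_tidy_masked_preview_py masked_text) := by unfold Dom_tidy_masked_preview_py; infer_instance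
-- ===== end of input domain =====

-- B replaces A's stateful buffer/newline accumulator loop by a precomputed (content, newline)
-- pair list scanned in maximal runs of single-char lines (alternative decomposition, same cost).


-- ===== PORT A =====

-- s.splitlines(True) hand-ported (no PySem keepends variant); exact on Dom, whose only
-- line-break characters are '\n', '\r' and "\r\n".
def pvSplitlinesKeep : List Char → List Char → List (List Char)
  | [], acc => if acc.isEmpty then [] else [acc.reverse]
  | '\r' :: '\n' :: rest, acc => (acc.reverse ++ ['\r', '\n']) :: pvSplitlinesKeep rest []
  | '\r' :: rest, acc => (acc.reverse ++ ['\r']) :: pvSplitlinesKeep rest []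
  | '\n' :: rest, acc => (acc.reverse ++ ['\n']) :: pvSplitlinesKeep rest []
  | c :: rest, acc => pvSplitlinesKeep rest (c :: acc)

-- line.rstrip("\r\n") hand-ported (PySem has no rstrip-with-chars): drop trailing '\r'/'\n'; exact.
def pvRstripCRLF (l : List Char) : List Char :=
  (l.reverse.dropWhile (fun c => c == '\r' || c == '\n')).reverse

-- A's for-loop, transliterated as a recursion over the lines with A's exact state
-- (result, buffer, buffer_newline), including the trailing flush.
def pvLoopA : List (List Char) → List (List Char) → List (List Char) → List Char → List (List Char)
  | [], result, buffer, bnl =>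
      if ¬ buffer.isEmpty then
        result ++ [buffer.flatten ++ (if bnl.isEmpty then ['\n'] else bnl)]
      else result
  | line :: rest, result, buffer, bnl =>
      -- content := line.rstrip("\r\n"), newline := line[len(content):], written inline
      if ¬ (pvRstripCRLF line).isEmpty ∧ (pvRstripCRLF line).length ≤ 1 then
        pvLoopA rest result (buffer ++ [pvRstripCRLF line])
          (if (line.drop (pvRstripCRLF line).length).isEmpty then bnl
           else line.drop (pvRstripCRLF line).length)
      else
        if ¬ buffer.isEmpty then
          pvLoopA rest (result ++ [buffer.flatten ++ (if bnl.isEmpty then ['\n'] else bnl)] ++ [line]) [] []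
        else
          pvLoopA rest (result ++ [line]) buffer bnl

def tidy_masked_preview_py (masked_text : String) : String :=
  if masked_text.toList.isEmpty then masked_text
  else String.mk (pvLoopA (pvSplitlinesKeep masked_text.toList []) [] [] []).flatten

-- ===== PORT B =====

-- the (content, newline) pair of one line
def pvToPair (l : List Char) : List Char × List Char :=
  let content := pvRstripCRLF l
  (content, l.drop content.length)

-- B's `single(p)`: 0 < len(p[0]) <= 1
def pvSingle (p : List Char × List Char) : Bool := ¬ p.1.isEmpty ∧ p.1.length ≤ 1

-- B's `next((q[1] for q in reversed(run) if q[1]), "\n")`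
def pvLastNL (run : List (List Char × List Char)) : List Char :=
  match run.reverse.find? (fun q => ¬ q.2.isEmpty) with
  | some q => q.2
  | none => ['\n']

-- B's outer while-loop over the pair list, transcribed as recursion on the remaining suffix:
-- a maximal run of single-char lines is consumed at once (B's inner j-scan = takeWhile/dropWhile).
def pvGoB : List (List Char × List Char) → List Char
  | [] => []
  | p :: ps =>
      if pvSingle p then
        let run := p :: ps.takeWhile pvSingle
        (run.map (·.1)).flatten ++ pvLastNL run ++ pvGoB (ps.dropWhile pvSingle)
      else
        p.1 ++ p.2 ++ pvGoB ps
termination_by ps => ps.length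
decreasing_by
  · have := (List.dropWhile_sublist (l := ps) (p := pvSingle)).length_le
    simp; omega
  · simp

def tidy_masked_preview_py_alt (masked_text : String) : String :=
  if masked_text.toList.isEmpty then masked_text
  else String.mk (pvGoB ((pvSplitlinesKeep masked_text.toList []).map pvToPair))

-- ===== PRECONDITION & SPEC =====
def Spec_tidy_masked_preview_py (masked_text : String) (out : String) : Prop := out = tidy_masked_preview_py_alt masked_text
instance (masked_text : String) (out : String) : Decidable (Spec_tidy_masked_preview_py masked_text out) := by unfold Spec_tidy_masked_preview_py; infer_instance

-- ===== CLAIM (what is proved, stated in full; the proofs are below) =====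
def Claim_equal_tidy_masked_preview_py : Prop := ∀ (masked_text : String), Dom_tidy_masked_preview_py masked_text → Spec_tidy_masked_preview_py masked_text (tidy_masked_preview_py masked_text)

-- ===== LEMMAS AND PROOFS =====

-- proof helper: pvLastNL with an explicit pending-newline fallback (A's buffer_newline)
def pvNlOf (bnl : List Char) (run : List (List Char × List Char)) : List Char :=
  match run.reverse.find? (fun q => ¬ q.2.isEmpty) with
  | some q => q.2
  | none => if bnl.isEmpty then ['\n'] else bnl

theorem pvLastNL_eq_nlOf (run : List (List Char × List Char)) : pvLastNL run = pvNlOf [] run := by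
  unfold pvLastNL pvNlOf
  cases run.reverse.find? (fun q => ¬ q.2.isEmpty) <;> simp

theorem pvNlOf_nil (bnl : List Char) :
    pvNlOf bnl [] = if bnl.isEmpty then ['\n'] else bnl := rfl

theorem pvNlOf_cons (bnl : List Char) (p : List Char × List Char)
    (run : List (List Char × List Char)) :
    pvNlOf bnl (p :: run) = pvNlOf (if p.2.isEmpty then bnl else p.2) run := by
  unfold pvNlOf
  rw [List.reverse_cons, List.find?_append]
  cases h : run.reverse.find? (fun q => ¬ q.2.isEmpty) <;>
    cases h2 : p.2 <;> simp [h2]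

theorem pvContent_append (l : List Char) :
    pvRstripCRLF l ++ l.drop (pvRstripCRLF l).length = l := by
  have hpre : pvRstripCRLF l <+: l := by
    have := List.dropWhile_suffix (l := l.reverse) (p := fun c => c == '\r' || c == '\n')
    have := List.reverse_prefix.mpr this
    simpa [pvRstripCRLF] using this
  calc pvRstripCRLF l ++ l.drop (pvRstripCRLF l).length
      = l.take (pvRstripCRLF l).length ++ l.drop (pvRstripCRLF l).length := by
        rw [← List.prefix_iff_eq_take.mp hpre]
    _ = l := List.take_append_drop _ _

-- equation lemmas for the three arms of A's loop body and B's run step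
theorem pvLoopA_single (line : List Char) (rest result buffer : List (List Char)) (bnl : List Char)
    (hs : ¬ (pvRstripCRLF line).isEmpty ∧ (pvRstripCRLF line).length ≤ 1) :
    pvLoopA (line :: rest) result buffer bnl =
      pvLoopA rest result (buffer ++ [pvRstripCRLF line])
        (if (line.drop (pvRstripCRLF line).length).isEmpty then bnl
         else line.drop (pvRstripCRLF line).length) := by
  conv_lhs => rw [pvLoopA.eq_def]
  simp only []
  rw [if_pos hs]

theorem pvLoopA_flush (line : List Char) (rest result buffer : List (List Char)) (bnl : List Char)
    (hs : ¬ (¬ (pvRstripCRLF line).isEmpty ∧ (pvRstripCRLF line).length ≤ 1))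
    (hb : ¬ buffer.isEmpty) :
    pvLoopA (line :: rest) result buffer bnl =
      pvLoopA rest
        (result ++ [buffer.flatten ++ (if bnl.isEmpty then ['\n'] else bnl)] ++ [line]) [] [] := by
  conv_lhs => rw [pvLoopA.eq_def]
  simp only []
  rw [if_neg hs, if_pos hb]

theorem pvLoopA_copy (line : List Char) (rest result : List (List Char)) (bnl : List Char)
    (hs : ¬ (¬ (pvRstripCRLF line).isEmpty ∧ (pvRstripCRLF line).length ≤ 1)) :
    pvLoopA (line :: rest) result [] bnl = pvLoopA rest (result ++ [line]) [] bnl := by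
  conv_lhs => rw [pvLoopA.eq_def]
  simp only []
  rw [if_neg hs, if_neg (by simp : ¬ (¬ (List.isEmpty ([] : List (List Char))) = true))]

theorem pvGoB_cons (p : List Char × List Char) (ps : List (List Char × List Char)) :
    pvGoB (p :: ps) =
      if pvSingle p then
        ((p :: ps.takeWhile pvSingle).map (·.1)).flatten
          ++ pvLastNL (p :: ps.takeWhile pvSingle) ++ pvGoB (ps.dropWhile pvSingle)
      else p.1 ++ p.2 ++ pvGoB ps := by
  rw [pvGoB]

theorem pvLoopA_res (lines : List (List Char)) :
    ∀ result buffer bnl,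
      pvLoopA lines result buffer bnl = result ++ pvLoopA lines [] buffer bnl := by
  induction lines with
  | nil => intro result buffer bnl; unfold pvLoopA; split <;> simp
  | cons line rest ih =>
      intro result buffer bnl
      unfold pvLoopA
      split
      · rw [ih, ih (buffer := buffer ++ [pvRstripCRLF line])]
      · split
        · conv_lhs => rw [ih]
          conv_rhs => rw [ih]
          simp
        · conv_lhs => rw [ih]
          conv_rhs => rw [ih]
          simp

-- main invariant: A's loop, flattened, equals B's run-scan; the second conjunct carries
-- A's nonempty buffer/buffer_newline state through a run in progress.
theorem pvMainAux (n : Nat) : ∀ (lines : List (List Char)), lines.length ≤ n →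
    ((pvLoopA lines [] [] []).flatten = pvGoB (lines.map pvToPair) ∧
     ∀ buffer bnl, ¬ buffer.isEmpty →
       (pvLoopA lines [] buffer bnl).flatten =
         buffer.flatten
           ++ (((lines.map pvToPair).takeWhile pvSingle).map (·.1)).flatten
           ++ pvNlOf bnl ((lines.map pvToPair).takeWhile pvSingle)
           ++ pvGoB ((lines.map pvToPair).dropWhile pvSingle)) := by
  induction n with
  | zero =>
      intro lines hlen
      have : lines = [] := List.eq_nil_of_length_eq_zero (Nat.le_zero.mp hlen)
      subst this
      constructor
      · simp [pvLoopA, pvGoB]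
      · intro buffer bnl hb
        simp [pvLoopA, pvGoB, pvNlOf, hb]
  | succ n ih =>
      intro lines hlen
      match lines with
      | [] =>
          constructor
          · simp [pvLoopA, pvGoB]
          · intro buffer bnl hb
            simp [pvLoopA, pvGoB, pvNlOf, hb]
      | line :: rest =>
          have hrest : rest.length ≤ n := by simpa using hlen
          have ihr := ih rest hrest
          have hp1 : (pvToPair line).1 = pvRstripCRLF line := rfl
          have hp2 : (pvToPair line).2 = line.drop (pvRstripCRLF line).length := rfl
          have hsingle_iff : (¬ (pvRstripCRLF line).isEmpty ∧ (pvRstripCRLF line).length ≤ 1)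
              ↔ pvSingle (pvToPair line) = true := by
            simp [pvSingle, pvToPair]
          by_cases hs : ¬ (pvRstripCRLF line).isEmpty ∧ (pvRstripCRLF line).length ≤ 1
          · -- single-char line: A extends the buffer, B keeps it in the current run
            have hsB : pvSingle (pvToPair line) = true := hsingle_iff.mp hs
            have step : ∀ buffer bnl, ¬ buffer.isEmpty →
                (pvLoopA (line :: rest) [] buffer bnl).flatten =
                  buffer.flatten
                    ++ ((((line :: rest).map pvToPair).takeWhile pvSingle).map (·.1)).flatten
                    ++ pvNlOf bnl (((line :: rest).map pvToPair).takeWhile pvSingle)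
                    ++ pvGoB (((line :: rest).map pvToPair).dropWhile pvSingle) := by
              intro buffer bnl hb
              rw [pvLoopA_single line rest [] buffer bnl hs,
                ihr.2 (buffer ++ [pvRstripCRLF line]) _ (by simp),
                List.map_cons, List.takeWhile_cons_of_pos hsB,
                List.dropWhile_cons_of_pos hsB, pvNlOf_cons]
              simp [hp1, hp2, List.append_assoc]
            constructor
            · -- empty buffer: A starts a buffer with this line
              rw [pvLoopA_single line rest [] [] [] hs, List.nil_append,
                ihr.2 [pvRstripCRLF line] _ (by simp),
                List.map_cons, pvGoB_cons, if_pos hsB, pvLastNL_eq_nlOf, pvNlOf_cons]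
              simp [hp1, hp2, List.append_assoc]
            · exact step
          · -- non-single line: A flushes the buffer (if any) and copies the line verbatim
            have hsB : pvSingle (pvToPair line) = false := by
              cases h : pvSingle (pvToPair line)
              · rfl
              · exact absurd (hsingle_iff.mpr h) hs
            have hline : (pvToPair line).1 ++ (pvToPair line).2 = line := by
              simpa [pvToPair] using pvContent_append line
            constructor
            · rw [pvLoopA_copy line rest [] [] hs, pvLoopA_res, List.flatten_append, ihr.1,
                List.map_cons, pvGoB_cons, if_neg (show ¬ (pvSingle (pvToPair line) = true) by simp [hsB]), hline]
              simp
            · intro buffer bnl hb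
              rw [pvLoopA_flush line rest [] buffer bnl hs hb, pvLoopA_res,
                List.flatten_append, ihr.1,
                List.map_cons, List.takeWhile_cons_of_neg (by simp [hsB]),
                List.dropWhile_cons_of_neg (by simp [hsB]),
                pvNlOf_nil, pvGoB_cons, if_neg (show ¬ (pvSingle (pvToPair line) = true) by simp [hsB]), hline]
              by_cases hbnl : bnl.isEmpty = true
              · simp [hbnl, List.append_assoc]
              · have hbnl' : ¬ bnl = [] := by simpa using hbnl
                simp [hbnl, hbnl', List.append_assoc]

-- ===== VERDICT (by name: the statement is the Claim_ definition above) =====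
theorem tidy_masked_preview_py_spec : Claim_equal_tidy_masked_preview_py := by
  intro s _
  unfold Spec_tidy_masked_preview_py tidy_masked_preview_py tidy_masked_preview_py_alt
  by_cases h : s.toList.isEmpty
  · rw [if_pos h, if_pos h]
  · rw [if_neg h, if_neg h,
      (pvMainAux (pvSplitlinesKeep s.toList []).length (pvSplitlinesKeep s.toList []) le_rfl).1]
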